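-- pv_equiv track=rewrite | github.com/trettier/Str_easy | ft_cmp_str.py | ft_cmp_str
-- ===== SOURCE A (Python) =====
-- def ft_cmp_str(a, b, c):
--     n = 0
--     for i in a:
--         n += 1
--     d = ""
--     for i in range(n):
--         if i + 1 != c:
--             d += a[i]
--         else:
--             d += b + a[i]
--     return d
-- ===== SOURCE B (Python) =====
-- def ft_cmp_str(a, b, c):
--     n = len(a)
--     if 1 <= c <= n:
--         return a[:c-1] + b + a[c-1:]
--     return a
-- ===== Notes on version B (the rewrite author's own statement) =====
-- stated objective: simpler
-- what changed: A's length-counting loop and per-character rebuild loop are replaced by a bounds check and two bulk slices: a[:c-1] + b + a[c-1:] when 1 <= c <= len(a), else a unchanged.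
import Mathlib
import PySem

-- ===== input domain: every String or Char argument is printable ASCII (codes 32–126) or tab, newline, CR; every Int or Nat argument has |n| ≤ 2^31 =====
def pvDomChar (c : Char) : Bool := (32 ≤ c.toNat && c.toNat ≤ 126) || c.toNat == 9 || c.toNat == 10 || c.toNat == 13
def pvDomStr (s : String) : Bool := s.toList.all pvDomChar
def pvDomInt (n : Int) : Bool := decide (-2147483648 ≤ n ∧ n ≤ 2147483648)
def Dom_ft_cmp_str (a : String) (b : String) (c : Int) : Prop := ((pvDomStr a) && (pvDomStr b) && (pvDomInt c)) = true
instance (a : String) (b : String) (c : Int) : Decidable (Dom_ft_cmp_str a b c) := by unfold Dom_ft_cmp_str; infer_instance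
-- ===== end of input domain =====

-- B replaces A's two character loops (length count + per-character rebuild) by a bounds check and
-- two bulk slices ('simpler'; same return value on every input).

-- ===== PORT A =====
-- literal port: count the length with a loop, then rebuild d character by character,
-- splicing b in front of the character at 1-based position c.
def ft_cmp_str (a : String) (b : String) (c : Int) : String :=
  let as := a.toList
  let n : Int := as.foldl (fun m _ => m + 1) 0
  let d : List Char :=
    (PySem.List.pyRange 0 n 1).foldl
      (fun d i =>
        if i + 1 ≠ c then d ++ [PySem.List.pyGetD as i ' ']
        else d ++ b.toList ++ [PySem.List.pyGetD as i ' ']) []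
  String.ofList d

-- ===== PORT B =====
-- Source B: n = len(a); if 1 <= c <= n: a[:c-1] + b + a[c-1:] else a
def ft_cmp_str_alt (a : String) (b : String) (c : Int) : String :=
  let as := a.toList
  let n : Int := as.length
  if 1 ≤ c ∧ c ≤ n then
    String.ofList (PySem.List.slice as none (some (c - 1)) ++ b.toList ++ PySem.List.slice as (some (c - 1)) none)
  else a

-- ===== PRECONDITION & SPEC =====
def Spec_ft_cmp_str (a : String) (b : String) (c : Int) (out : String) : Prop := out = ft_cmp_str_alt a b c
instance (a : String) (b : String) (c : Int) (out : String) : Decidable (Spec_ft_cmp_str a b c out) := by unfold Spec_ft_cmp_str; infer_instance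

-- ===== CLAIM (what is proved, stated in full; the proofs are below) =====
def Claim_equal_ft_cmp_str : Prop := ∀ (a : String) (b : String) (c : Int), Dom_ft_cmp_str a b c → Spec_ft_cmp_str a b c (ft_cmp_str a b c)

-- ===== LEMMAS AND PROOFS =====

-- the flatMap description of A's rebuild loop
theorem ftA_flatMap (as bs : List Char) (c n : Int) :
    (PySem.List.pyRange 0 n 1).foldl
      (fun d i =>
        if i + 1 ≠ c then d ++ [PySem.List.pyGetD as i ' ']
        else d ++ bs ++ [PySem.List.pyGetD as i ' ']) []
    = (PySem.List.pyRange 0 n 1).flatMap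
        (fun i => if i + 1 ≠ c then [PySem.List.pyGetD as i ' ']
                  else bs ++ [PySem.List.pyGetD as i ' ']) := by
  have hf : (fun (d : List Char) (i : Int) =>
        if i + 1 ≠ c then d ++ [PySem.List.pyGetD as i ' ']
        else d ++ bs ++ [PySem.List.pyGetD as i ' '])
      = fun d i => d ++ (if i + 1 ≠ c then [PySem.List.pyGetD as i ' ']
                         else bs ++ [PySem.List.pyGetD as i ' ']) := by
    funext d i; split_ifs <;> simp
  rw [hf, PySem.List.foldl_append_eq_flatMap]
  simp

-- a flatMap whose pieces are all singletons is a map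
theorem flatMap_singleton_congr {α β : Type} (l : List α) (g : α → List β) (f : α → β)
    (h : ∀ x ∈ l, g x = [f x]) : l.flatMap g = l.map f := by
  induction l with
  | nil => rfl
  | cons x xs ih =>
      simp only [List.flatMap_cons, List.map_cons, h x (by simp)]
      rw [ih (fun y hy => h y (by simp [hy]))]
      rfl

theorem ft_cmp_str_spec' (a b : String) (c : Int) : ft_cmp_str a b c = ft_cmp_str_alt a b c := by
  unfold ft_cmp_str ft_cmp_str_alt
  simp only
  set as := a.toList with has
  have hn : as.foldl (fun m _ => m + 1) 0 = (as.length : Int) := by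
    rw [PySem.List.foldl_add as (fun _ => 1) 0]
    simp
  rw [hn, ftA_flatMap]
  by_cases hc : 1 ≤ c ∧ c ≤ (as.length : Int)
  · rw [if_pos hc]
    have h0 : (0:Int) ≤ c - 1 := by omega
    have hlt : c - 1 < (as.length : Int) := by omega
    set p : Nat := (c - 1).toNat with hp
    have hpc : (p : Int) = c - 1 := by omega
    have hplen : p < as.length := by omega
    -- split the index range at c-1
    rw [PySem.List.pyRange_one_append 0 (c - 1) (as.length : Int) (by omega) (by omega),
        List.flatMap_append,
        PySem.List.pyRange_one_cons (show c - 1 < (as.length : Int) from hlt),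
        List.flatMap_cons]
    -- the prefix: indices 0 … c-2
    have hpre : (PySem.List.pyRange 0 (c - 1) 1).flatMap
        (fun i => if i + 1 ≠ c then [PySem.List.pyGetD as i ' ']
                  else b.toList ++ [PySem.List.pyGetD as i ' '])
        = as.take p := by
      rw [flatMap_singleton_congr _ _ (fun i => PySem.List.pyGetD as i ' ')
          (by intro x hx
              have hb := PySem.List.mem_pyRange_one.mp hx
              rw [if_pos (by omega)])]
      have := PySem.List.map_pyGetD_pyRange_zero' (xs := as.take p) (d := ' ')
      have hlen : ((as.take p).length : Int) = (p : Int) := by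
        simp [List.length_take, Nat.min_eq_left (le_of_lt hplen)]
      rw [hlen, hpc] at this
      rw [← this]
      apply List.map_congr_left
      intro i hi
      have hb := PySem.List.mem_pyRange_one.mp hi
      rw [PySem.List.pyGetD_eq_getElem as ' ' hb.1 (by omega),
          PySem.List.pyGetD_eq_getElem (as.take p) ' ' hb.1
            (by simp [List.length_take]; omega)]
      rw [List.getElem_take]
    -- the suffix: indices c … n-1
    have hsuf : (PySem.List.pyRange c (as.length : Int) 1).flatMap
        (fun i => if i + 1 ≠ c then [PySem.List.pyGetD as i ' ']
                  else b.toList ++ [PySem.List.pyGetD as i ' '])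
        = as.drop (p + 1) := by
      rw [flatMap_singleton_congr _ _ (fun i => PySem.List.pyGetD as i ' ')
          (by intro x hx
              have hb := PySem.List.mem_pyRange_one.mp hx
              rw [if_pos (by omega)])]
      have := PySem.List.map_pyGetD_pyRange' (xs := as) (d := ' ') (a := c) (by omega)
      rw [this]
      congr 1
      omega
    rw [show c - 1 + 1 = c by omega, if_neg (show ¬ c ≠ c by simp)]
    rw [hpre, hsuf, PySem.List.pyGetD_eq_getElem as ' ' h0 hlt,
        PySem.List.slice_to as h0, PySem.List.slice_from as h0]
    congr 1
    show List.take p as ++ (b.toList ++ [as[p]] ++ List.drop (p + 1) as)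
        = List.take p as ++ b.toList ++ List.drop p as
    simp only [List.append_assoc, List.singleton_append, List.getElem_cons_drop]
  · rw [if_neg hc]
    have hall : (PySem.List.pyRange 0 (as.length : Int) 1).flatMap
        (fun i => if i + 1 ≠ c then [PySem.List.pyGetD as i ' ']
                  else b.toList ++ [PySem.List.pyGetD as i ' '])
        = as := by
      rw [flatMap_singleton_congr _ _ (fun i => PySem.List.pyGetD as i ' ')
          (by intro x hx
              have hb := PySem.List.mem_pyRange_one.mp hx
              rw [if_pos (by intro he; exact hc ⟨by omega, by omega⟩)])]
      exact PySem.List.map_pyGetD_pyRange_zero' (xs := as) (d := ' ')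
    rw [hall, has, String.ofList_toList]

-- ===== VERDICT (by name: the statement is the Claim_ definition above) =====
theorem ft_cmp_str_spec : Claim_equal_ft_cmp_str := by
  intro a b c _
  exact ft_cmp_str_spec' a b c
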